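-- pv_equiv track=rewrite | github.com/rlagusgh0223/Algorithm | 221218/16234, 인구 이동.py | bfs
-- ===== SOURCE A (Python) =====
-- from collections import deque
--
-- def bfs(a, l, r):
--     n = len(a)
--     c = [[False]*n for _ in range(n)]
--     ok = False
--     for i in range(n):
--         for j in range(n):
--             if c[i][j] == False:
--                 c[i][j] = True
--                 q = deque()
--                 q.append((i, j))
--                 s = [(i, j)]
--                 total = a[i][j]
--                 while q:
--                     x, y = q.popleft()
--                     for k in range(4):
--                         nx, ny = x+dx[k], y+dy[k]
--                         if 0<=nx<n and 0<=ny<n and c[nx][ny]==False: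
--                             if l <= abs(a[nx][ny]-a[x][y]) <= r:
--                                 c[nx][ny] = True
--                                 q.append((nx, ny))
--                                 s.append((nx, ny))
--                                 total += a[nx][ny]
--                                 ok = True
--                 val = total//len(s)
--                 for x, y in s:
--                     a[x][y] = val
--     return ok
--
-- dx = [-1, 0, 1, 0]
--
-- dy = [0, 1, 0, -1]
-- ===== SOURCE B (Python) =====
-- def bfs(a, l, r):
--     # Return-value-only reimplementation: movement occurs iff some adjacent pair
--     # qualifies; scan each cell's right and down neighbor once. Does NOT mutate a.
--     n = len(a)
--     for i in range(n):
--         for j in range(n):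
--             x = a[i][j]
--             if j + 1 < n and l <= abs(x - a[i][j + 1]) <= r:
--                 return True
--             if i + 1 < n and l <= abs(x - a[i + 1][j]) <= r:
--                 return True
--     return False
-- ===== Notes on version B (the rewrite author's own statement) =====
-- stated objective: simpler
-- what changed: Replaces the flood-fill BFS over components (visited grid, deque, per-component sum and in-place averaging) with a single early-exiting scan of each cell's right and down neighbor, since movement occurs iff some adjacent pair differs by a value in [l, r]; B computes only the return value and does not perform A's in-place mutation of a.
import Mathlib
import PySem

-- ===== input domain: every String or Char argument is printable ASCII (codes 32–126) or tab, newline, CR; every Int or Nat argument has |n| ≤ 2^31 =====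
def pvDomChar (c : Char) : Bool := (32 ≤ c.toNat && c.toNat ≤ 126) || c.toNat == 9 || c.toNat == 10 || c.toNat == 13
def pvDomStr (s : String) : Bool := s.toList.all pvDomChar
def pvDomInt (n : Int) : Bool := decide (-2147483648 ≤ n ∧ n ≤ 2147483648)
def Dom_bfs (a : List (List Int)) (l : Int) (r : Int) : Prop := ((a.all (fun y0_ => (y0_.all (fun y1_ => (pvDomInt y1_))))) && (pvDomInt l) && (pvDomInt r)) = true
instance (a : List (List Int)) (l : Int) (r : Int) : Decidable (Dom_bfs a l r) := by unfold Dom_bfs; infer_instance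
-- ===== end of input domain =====

-- B computes only the return value (whether any movement occurs) by one scan of
-- right/down neighbor pairs; unlike A it does not mutate a — the equivalence
-- proved here is about the RETURN value only.


-- ===== PORT A =====
-- dx = [-1, 0, 1, 0] ; dy = [0, 1, 0, -1]
def pvDx : List Int := [-1, 0, 1, 0]
def pvDy : List Int := [0, 1, 0, -1]

-- a[x][y] / c[x][y] for indices that the guards have already made nonnegative
-- and (under Pre_) in range, so .toNat + getD is exact here.
def pvGetI (m : List (List Int)) (x y : Int) : Int := (m.getD x.toNat []).getD y.toNat 0
def pvGetB (c : List (List Bool)) (x y : Int) : Bool := (c.getD x.toNat []).getD y.toNat false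
def pvSetB (c : List (List Bool)) (x y : Int) : List (List Bool) := c.set x.toNat ((c.getD x.toNat []).set y.toNat true)
def pvSetI (m : List (List Int)) (x y : Int) (v : Int) : List (List Int) := m.set x.toNat ((m.getD x.toNat []).set y.toNat v)

-- body of "for k in range(4)": state = (c, q, s, total, ok)
def pvNbStep (a : List (List Int)) (n l r : Int) (x y : Int)
    (st : List (List Bool) × List (Int × Int) × List (Int × Int) × Int × Bool) (k : Nat) :
    List (List Bool) × List (Int × Int) × List (Int × Int) × Int × Bool :=
  let nx := x + pvDx.getD k 0
  let ny := y + pvDy.getD k 0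
  if 0 ≤ nx ∧ nx < n ∧ 0 ≤ ny ∧ ny < n ∧ pvGetB st.1 nx ny = false then
    if l ≤ |pvGetI a nx ny - pvGetI a x y| ∧ |pvGetI a nx ny - pvGetI a x y| ≤ r then
      (pvSetB st.1 nx ny, st.2.1 ++ [(nx, ny)], st.2.2.1 ++ [(nx, ny)],
       st.2.2.2.1 + pvGetI a nx ny, true)
    else st
  else st

-- "while q:" — fuel-bounded (each iteration pops one element; at most n*n cells
-- are ever enqueued, so fuel n*n+1 is never exhausted); returns (c, s, total, ok)
def pvBfsLoop (a : List (List Int)) (n l r : Int) :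
    Nat → List (List Bool) → List (Int × Int) → List (Int × Int) → Int → Bool →
    List (List Bool) × List (Int × Int) × Int × Bool
  | _, c, [], s, total, ok => (c, s, total, ok)
  | 0, c, _, s, total, ok => (c, s, total, ok)
  | fuel + 1, c, (x, y) :: q', s, total, ok =>
    let st := (List.range 4).foldl (pvNbStep a n l r x y) (c, q', s, total, ok)
    pvBfsLoop a n l r fuel st.1 st.2.1 st.2.2.1 st.2.2.2.1 st.2.2.2.2

-- body of the double "for i / for j" loop: state = (a, c, ok)
def pvCellStep (n l r : Int) (st : List (List Int) × List (List Bool) × Bool)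
    (ij : Int × Int) : List (List Int) × List (List Bool) × Bool :=
  if pvGetB st.2.1 ij.1 ij.2 = false then
    let c1 := pvSetB st.2.1 ij.1 ij.2
    let res := pvBfsLoop st.1 n l r (st.1.length * st.1.length + 1) c1 [(ij.1, ij.2)]
      [(ij.1, ij.2)] (pvGetI st.1 ij.1 ij.2) st.2.2
    let val := PySem.Int.floordiv res.2.2.1 (res.2.1.length : Int)
    (res.2.1.foldl (fun m xy => pvSetI m xy.1 xy.2 val) st.1, res.1, res.2.2.2)
  else st

def bfs (a : List (List Int)) (l : Int) (r : Int) : Bool :=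
  let n : Int := (a.length : Int)
  let c0 := List.replicate a.length (List.replicate a.length false)
  let cells := (List.range a.length).flatMap
    (fun i : Nat => (List.range a.length).map (fun j : Nat => ((i : Int), (j : Int))))
  (cells.foldl (pvCellStep n l r) (a, c0, false)).2.2

-- ===== PORT B =====
def bfs_alt (a : List (List Int)) (l : Int) (r : Int) : Bool :=
  let n := a.length
  (List.range n).any fun i => (List.range n).any fun j =>
    let x := (a.getD i []).getD j 0
    (decide (j + 1 < n) &&
      decide (l ≤ |x - (a.getD i []).getD (j + 1) 0| ∧ |x - (a.getD i []).getD (j + 1) 0| ≤ r))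
    || (decide (i + 1 < n) &&
      decide (l ≤ |x - (a.getD (i + 1) []).getD j 0| ∧ |x - (a.getD (i + 1) []).getD j 0| ≤ r))

-- ===== PRECONDITION & SPEC =====
-- Pre_ excludes ragged grids with a row shorter than len(a), on which the
-- Python A raises IndexError; nothing else is excluded.
def Pre_bfs (a : List (List Int)) (l : Int) (r : Int) : Prop :=
  ∀ row ∈ a, a.length ≤ row.length
instance (a : List (List Int)) (l : Int) (r : Int) : Decidable (Pre_bfs a l r) := by
  unfold Pre_bfs; infer_instance

def pvWitness_bfs : List (List Int) × Int × Int := ([[1, 2], [3, 4]], 1, 3)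

def Spec_bfs (a : List (List Int)) (l : Int) (r : Int) (out : Bool) : Prop := out = bfs_alt a l r
instance (a : List (List Int)) (l : Int) (r : Int) (out : Bool) : Decidable (Spec_bfs a l r out) := by unfold Spec_bfs; infer_instance

-- ===== CLAIM (what is proved, stated in full; the proofs are below) =====
def Claim_equal_bfs : Prop := ∀ (a : List (List Int)) (l : Int) (r : Int), Dom_bfs a l r → Pre_bfs a l r → Spec_bfs a l r (bfs a l r)

-- ===== LEMMAS AND PROOFS =====

-- ---- proof-side notions: the visited grid as a predicate, qualifying edges ----
def pvPf (i j x y : Nat) : Bool := decide (x < i ∨ (x = i ∧ y < j))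
def pvCShape (n : Nat) (c : List (List Bool)) : Prop :=
  c.length = n ∧ ∀ x, x < n → (c.getD x []).length = n
def pvCVis (n : Nat) (P : Nat → Nat → Bool) (c : List (List Bool)) : Prop :=
  ∀ x y : Nat, x < n → y < n → pvGetB c ↑x ↑y = P x y
def pvQR (a : List (List Int)) (l r : Int) (i j : Nat) : Prop :=
  l ≤ |pvGetI a ↑i ↑(j + 1) - pvGetI a ↑i ↑j| ∧ |pvGetI a ↑i ↑(j + 1) - pvGetI a ↑i ↑j| ≤ r
def pvQD (a : List (List Int)) (l r : Int) (i j : Nat) : Prop :=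
  l ≤ |pvGetI a ↑(i + 1) ↑j - pvGetI a ↑i ↑j| ∧ |pvGetI a ↑(i + 1) ↑j - pvGetI a ↑i ↑j| ≤ r
def pvGood (a : List (List Int)) (l r : Int) (x y : Nat) : Prop :=
  (y + 1 < a.length → ¬ pvQR a l r x y) ∧ (x + 1 < a.length → ¬ pvQD a l r x y)
def pvTailGood (a : List (List Int)) (l r : Int) (i : Nat) : Prop :=
  ∀ x y : Nat, x < a.length → y < a.length → i ≤ x → pvGood a l r x y
def pvRowGood (a : List (List Int)) (l r : Int) (i j : Nat) : Prop :=
  ∀ y : Nat, j ≤ y → y < a.length → pvGood a l r i y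

lemma pvGetD_set {α : Type} (L : List α) (d : α) (i x : Nat) (R : α) (hi : i < L.length) :
    (L.set i R).getD x d = if x = i then R else L.getD x d := by
  simp only [List.getD_eq_getElem?_getD, List.getElem?_set]
  by_cases h : x = i
  · subst h; simp [hi]
  · rw [if_neg (fun hh => h hh.symm), if_neg h]

lemma pvGetB_nat (c : List (List Bool)) (x y : Nat) :
    pvGetB c ↑x ↑y = (c.getD x []).getD y false := by simp [pvGetB]

lemma pvSetB_nat (c : List (List Bool)) (x y : Nat) :
    pvSetB c ↑x ↑y = c.set x ((c.getD x []).set y true) := by simp [pvSetB]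

lemma pvCShape_set {n : Nat} {c : List (List Bool)} (h : pvCShape n c) (x y : Nat)
    (hx : x < n) : pvCShape n (pvSetB c ↑x ↑y) := by
  obtain ⟨h1, h2⟩ := h
  rw [pvSetB_nat]
  refine ⟨by simp [h1], ?_⟩
  intro x' hx'
  rw [pvGetD_set _ _ _ _ _ (by omega)]
  by_cases hxx : x' = x
  · rw [if_pos hxx, List.length_set]; exact h2 x hx
  · rw [if_neg hxx]; exact h2 x' hx'

lemma pvGetB_setB {n : Nat} {c : List (List Bool)} (h : pvCShape n c) (i j x y : Nat)
    (hi : i < n) (hj : j < n) :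
    pvGetB (pvSetB c ↑i ↑j) ↑x ↑y = if x = i ∧ y = j then true else pvGetB c ↑x ↑y := by
  obtain ⟨h1, h2⟩ := h
  rw [pvSetB_nat, pvGetB_nat, pvGetB_nat, pvGetD_set _ _ _ _ _ (by omega)]
  by_cases hxx : x = i
  · subst hxx
    rw [if_pos rfl, pvGetD_set _ _ _ _ _ (by rw [h2 x hi]; omega)]
    by_cases hyy : y = j <;> simp [hyy]
  · simp [hxx]

-- ---- the ok flag: each neighbor step is the identity or sets ok ----
lemma pvNbStep_id_or_true (a : List (List Int)) (n l r x y : Int)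
    (st : List (List Bool) × List (Int × Int) × List (Int × Int) × Int × Bool) (k : Nat) :
    pvNbStep a n l r x y st k = st ∨ (pvNbStep a n l r x y st k).2.2.2.2 = true := by
  unfold pvNbStep
  dsimp only
  split_ifs with h1 h2
  · right; rfl
  · left; rfl
  · left; rfl

lemma pvNbFold_mono (a : List (List Int)) (n l r x y : Int)
    (st : List (List Bool) × List (Int × Int) × List (Int × Int) × Int × Bool)
    (h : st.2.2.2.2 = true) :
    ((List.range 4).foldl (pvNbStep a n l r x y) st).2.2.2.2 = true := by
  have step : ∀ (s : List (List Bool) × List (Int × Int) × List (Int × Int) × Int × Bool)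
      (k : Nat), s.2.2.2.2 = true → (pvNbStep a n l r x y s k).2.2.2.2 = true := by
    intro s k hs
    rcases pvNbStep_id_or_true a n l r x y s k with h' | h'
    · rw [h']; exact hs
    · exact h'
  have : ∀ (L : List Nat) (s : List (List Bool) × List (Int × Int) × List (Int × Int) × Int × Bool),
      s.2.2.2.2 = true → (L.foldl (pvNbStep a n l r x y) s).2.2.2.2 = true := by
    intro L
    induction L with
    | nil => intro s hs; exact hs
    | cons hd tl ih => intro s hs; exact ih _ (step s hd hs)
  exact this _ st h

lemma pvBfsLoop_mono (a : List (List Int)) (n l r : Int) :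
    ∀ (fuel : Nat) (c : List (List Bool)) (q s : List (Int × Int)) (t : Int),
    (pvBfsLoop a n l r fuel c q s t true).2.2.2 = true := by
  intro fuel
  induction fuel with
  | zero => intro c q s t; cases q <;> rfl
  | succ m ih =>
    intro c q s t
    match q with
    | [] => rfl
    | (x, y) :: q' =>
      rw [pvBfsLoop]
      have hst := pvNbFold_mono a n l r x y (c, q', s, t, true) rfl
      set st := (List.range 4).foldl (pvNbStep a n l r x y) (c, q', s, t, true) with hstdef
      rw [show st.2.2.2.2 = true from hst]
      exact ih _ _ _ _

lemma pvCellStep_mono (n l r : Int) (st : List (List Int) × List (List Bool) × Bool)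
    (ij : Int × Int) (h : st.2.2 = true) : (pvCellStep n l r st ij).2.2 = true := by
  unfold pvCellStep
  split_ifs with h1
  · simp only [h]
    exact pvBfsLoop_mono _ _ _ _ _ _ _ _ _
  · exact h

lemma pvCellFold_mono (n l r : Int) (L : List (Int × Int))
    (st : List (List Int) × List (List Bool) × Bool) (h : st.2.2 = true) :
    (L.foldl (pvCellStep n l r) st).2.2 = true := by
  induction L generalizing st with
  | nil => exact h
  | cons hd tl ih => exact ih _ (pvCellStep_mono n l r st hd h)

-- ---- the averaging rewrite of a singleton component leaves `a` unchanged ----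
lemma pvSetI_self (a : List (List Int)) (i j : Nat) (hi : i < a.length)
    (hj : j < (a.getD i []).length) :
    pvSetI a ↑i ↑j (pvGetI a ↑i ↑j) = a := by
  simp only [pvSetI, pvGetI, Int.toNat_natCast]
  rw [List.getD_eq_getElem a [] hi] at hj ⊢
  rw [List.getD_eq_getElem _ 0 hj, List.set_getElem_self hj, List.set_getElem_self hi]

-- ---- what one outer-loop step does when started with ok = false ----
lemma pvCellStep_char (a : List (List Int)) (l r : Int) (i j : Nat)
    (hpre : Pre_bfs a l r) (hi : i < a.length) (hj : j < a.length)
    (c : List (List Bool)) (hsh : pvCShape a.length c)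
    (hvis : pvCVis a.length (pvPf i j) c) :
    (((j + 1 < a.length → ¬ pvQR a l r i j) ∧ (i + 1 < a.length → ¬ pvQD a l r i j)) →
        pvCellStep (a.length : Int) l r (a, c, false) (↑i, ↑j) = (a, pvSetB c ↑i ↑j, false))
    ∧ ((pvCellStep (a.length : Int) l r (a, c, false) (↑i, ↑j)).2.2 = false →
        ((j + 1 < a.length → ¬ pvQR a l r i j) ∧ (i + 1 < a.length → ¬ pvQD a l r i j))) := by
  have h0 : pvGetB c ↑i ↑j = false := by
    rw [hvis i j hi hj]; simp [pvPf]
  set n := a.length with hn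
  set c1 := pvSetB c ↑i ↑j with hc1
  have hget1 : ∀ x y : Nat, x < n → y < n → pvGetB c1 ↑x ↑y = pvPf i (j + 1) x y := by
    intro x y hx hy
    rw [hc1, pvGetB_setB hsh i j x y hi hj]
    split_ifs with h
    · rw [eq_comm, pvPf, decide_eq_true_eq]; omega
    · rw [hvis x y hx hy, pvPf, pvPf, decide_eq_decide]; omega
  set T := pvGetI a ↑i ↑j with hT
  set st0 : List (List Bool) × List (Int × Int) × List (Int × Int) × Int × Bool :=
    (c1, [], [((i : Int), (j : Int))], T, false) with hst0
  -- the four directions of the "for k in range(4)" pass, started at st0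
  have hk0 : pvNbStep a ↑n l r ↑i ↑j st0 0 = st0 := by
    unfold pvNbStep; dsimp only
    rw [if_neg]
    rintro ⟨hA, hB, hC, hD', hE⟩
    have e : pvDx.getD 0 0 = -1 := rfl
    rw [e] at hA hB hE
    rcases Nat.eq_zero_or_pos i with hiz | hip
    · omega
    · have e1 : ((i : Int) + -1) = ((i - 1 : Nat) : Int) := by omega
      have e2 : ((j : Int) + pvDy.getD 0 0) = ((j : Nat) : Int) := by
        have : pvDy.getD 0 0 = 0 := rfl
        omega
      rw [e1, e2, hget1 (i - 1) j (by omega) hj] at hE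
      rw [pvPf, decide_eq_false_iff_not] at hE
      omega
  have hk3 : pvNbStep a ↑n l r ↑i ↑j st0 3 = st0 := by
    unfold pvNbStep; dsimp only
    rw [if_neg]
    rintro ⟨hA, hB, hC, hD', hE⟩
    have e : pvDy.getD 3 0 = -1 := rfl
    rw [e] at hC hD' hE
    rcases Nat.eq_zero_or_pos j with hjz | hjp
    · omega
    · have e1 : ((j : Int) + -1) = ((j - 1 : Nat) : Int) := by omega
      have e2 : ((i : Int) + pvDx.getD 3 0) = ((i : Nat) : Int) := by
        have : pvDx.getD 3 0 = 0 := rfl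
        omega
      rw [e1, e2, hget1 i (j - 1) hi (by omega)] at hE
      rw [pvPf, decide_eq_false_iff_not] at hE
      omega
  have e10 : pvDx.getD 1 0 = 0 := rfl
  have e11 : pvDy.getD 1 0 = 1 := rfl
  have e20 : pvDx.getD 2 0 = 1 := rfl
  have e21 : pvDy.getD 2 0 = 0 := rfl
  have f1x : ((i : Int) + pvDx.getD 1 0) = ↑i := by rw [e10]; omega
  have f1y : ((j : Int) + pvDy.getD 1 0) = ↑(j + 1) := by rw [e11]; omega
  have f2x : ((i : Int) + pvDx.getD 2 0) = ↑(i + 1) := by rw [e20]; omega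
  have f2y : ((j : Int) + pvDy.getD 2 0) = ↑j := by rw [e21]; omega
  have hk1 : (j + 1 < n → ¬ pvQR a l r i j) → pvNbStep a ↑n l r ↑i ↑j st0 1 = st0 := by
    intro hR
    unfold pvNbStep; dsimp only
    rw [f1x, f1y]
    split_ifs with hcond hqual
    · exfalso
      obtain ⟨hA, hB, hC, hD', hE⟩ := hcond
      exact hR (by omega) hqual
    · rfl
    · rfl
  have hk1' : j + 1 < n → pvQR a l r i j → (pvNbStep a ↑n l r ↑i ↑j st0 1).2.2.2.2 = true := by
    intro hlt hQ
    unfold pvNbStep; dsimp only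
    rw [f1x, f1y]
    split_ifs with hcond hqual
    · rfl
    · exact absurd hQ hqual
    · exfalso
      apply hcond
      refine ⟨by omega, by omega, by omega, by omega, ?_⟩
      show pvGetB c1 ↑i ↑(j + 1) = false
      rw [hget1 i (j + 1) hi hlt, pvPf, decide_eq_false_iff_not]
      omega
  have hk2 : (i + 1 < n → ¬ pvQD a l r i j) → pvNbStep a ↑n l r ↑i ↑j st0 2 = st0 := by
    intro hD
    unfold pvNbStep; dsimp only
    rw [f2x, f2y]
    split_ifs with hcond hqual
    · exfalso
      obtain ⟨hA, hB, hC, hD', hE⟩ := hcond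
      exact hD (by omega) hqual
    · rfl
    · rfl
  have hk2' : i + 1 < n → pvQD a l r i j → (pvNbStep a ↑n l r ↑i ↑j st0 2).2.2.2.2 = true := by
    intro hlt hQ
    unfold pvNbStep; dsimp only
    rw [f2x, f2y]
    split_ifs with hcond hqual
    · rfl
    · exact absurd hQ hqual
    · exfalso
      apply hcond
      refine ⟨by omega, by omega, by omega, by omega, ?_⟩
      show pvGetB c1 ↑(i + 1) ↑j = false
      rw [hget1 (i + 1) j hlt hj, pvPf, decide_eq_false_iff_not]
      omega
  have hrange4 : (List.range 4) = [0, 1, 2, 3] := rfl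
  have mono1 : ∀ (s : List (List Bool) × List (Int × Int) × List (Int × Int) × Int × Bool)
      (k : Nat), s.2.2.2.2 = true → (pvNbStep a ↑n l r ↑i ↑j s k).2.2.2.2 = true := by
    intro s k hs
    rcases pvNbStep_id_or_true a ↑n l r ↑i ↑j s k with h' | h'
    · rw [h']; exact hs
    · exact h'
  have hloop : (j + 1 < n → ¬ pvQR a l r i j) → (i + 1 < n → ¬ pvQD a l r i j) →
      pvBfsLoop a ↑n l r (a.length * a.length + 1) c1 [(↑i, ↑j)] [(↑i, ↑j)] T false
        = (c1, [(↑i, ↑j)], T, false) := by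
    intro hR hD
    have hfold : (List.range 4).foldl (pvNbStep a ↑n l r ↑i ↑j) st0 = st0 := by
      rw [hrange4]
      simp only [List.foldl_cons, List.foldl_nil]
      rw [hk0, hk1 hR, hk2 hD, hk3]
    rw [pvBfsLoop]
    try dsimp only
    rw [← hst0, hfold, hst0]
    try dsimp only
    rw [pvBfsLoop]
  have hloopTrueR : j + 1 < n → pvQR a l r i j →
      (pvBfsLoop a ↑n l r (a.length * a.length + 1) c1 [(↑i, ↑j)] [(↑i, ↑j)] T false).2.2.2
        = true := by
    intro hlt hQ
    have hfold : ((List.range 4).foldl (pvNbStep a ↑n l r ↑i ↑j) st0).2.2.2.2 = true := by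
      rw [hrange4]
      simp only [List.foldl_cons, List.foldl_nil]
      rw [hk0]
      exact mono1 _ 3 (mono1 _ 2 (hk1' hlt hQ))
    rw [pvBfsLoop]
    try dsimp only
    rw [← hst0, hfold]
    exact pvBfsLoop_mono a ↑n l r _ _ _ _ _
  have hloopTrueD : i + 1 < n → pvQD a l r i j →
      (pvBfsLoop a ↑n l r (a.length * a.length + 1) c1 [(↑i, ↑j)] [(↑i, ↑j)] T false).2.2.2
        = true := by
    intro hlt hQ
    have hfold : ((List.range 4).foldl (pvNbStep a ↑n l r ↑i ↑j) st0).2.2.2.2 = true := by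
      rw [hrange4]
      simp only [List.foldl_cons, List.foldl_nil]
      rw [hk0]
      rcases pvNbStep_id_or_true a ↑n l r ↑i ↑j st0 1 with h1 | h1
      · rw [h1]
        exact mono1 _ 3 (hk2' hlt hQ)
      · exact mono1 _ 3 (mono1 _ 2 h1)
    rw [pvBfsLoop]
    try dsimp only
    rw [← hst0, hfold]
    exact pvBfsLoop_mono a ↑n l r _ _ _ _ _
  have hcs : ∀ res : List (List Bool) × List (Int × Int) × Int × Bool,
      pvBfsLoop a ↑n l r (a.length * a.length + 1) c1 [(↑i, ↑j)] [(↑i, ↑j)] T false = res →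
      pvCellStep (↑n) l r (a, c, false) (↑i, ↑j) =
        (res.2.1.foldl (fun m xy => pvSetI m xy.1 xy.2
            (PySem.Int.floordiv res.2.2.1 (res.2.1.length : Int))) a, res.1, res.2.2.2) := by
    intro res hres
    unfold pvCellStep
    try dsimp only
    rw [if_pos h0]
    try dsimp only
    rw [← hc1, ← hT, hres]
  constructor
  · rintro ⟨hR, hD⟩
    rw [hcs _ (hloop hR hD)]
    try dsimp only
    simp only [List.foldl_cons, List.foldl_nil]
    try dsimp only
    have hdiv : PySem.Int.floordiv T (([((i : Int), (j : Int))].length : Nat) : Int) = T := by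
      simp only [List.length_cons, List.length_nil]
      rw [PySem.Int.floordiv_eq_ediv_of_pos (by norm_num)]
      exact Int.ediv_one T
    rw [hdiv, hT]
    have hj' : j < (a.getD i []).length := by
      rw [List.getD_eq_getElem a [] hi]
      have := hpre a[i] (List.getElem_mem hi)
      omega
    rw [pvSetI_self a i j hi hj']
  · intro hout
    have hres := hcs _ rfl
    rw [hres] at hout
    dsimp only at hout
    constructor
    · intro hlt hQ
      rw [hloopTrueR hlt hQ] at hout
      simp at hout
    · intro hlt hQ
      rw [hloopTrueD hlt hQ] at hout
      simp at hout

-- ---- processing the tail of one row, then the remaining rows ----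
lemma pvRow_main (a : List (List Int)) (l r : Int) (hpre : Pre_bfs a l r) (i : Nat)
    (hi : i < a.length) (rest : List (Int × Int))
    (Hrest : ∀ c', pvCShape a.length c' → pvCVis a.length (pvPf (i + 1) 0) c' →
      ((rest.foldl (pvCellStep (a.length : Int) l r) (a, c', false)).2.2 = false ↔
        pvTailGood a l r (i + 1))) :
    ∀ (k j : Nat) (c : List (List Bool)), j + k = a.length →
      pvCShape a.length c → pvCVis a.length (pvPf i j) c →
      (((((List.range' j k).map (fun y : Nat => ((i : Int), (y : Int)))) ++ rest).foldl
          (pvCellStep (a.length : Int) l r) (a, c, false)).2.2 = false ↔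
        (pvRowGood a l r i j ∧ pvTailGood a l r (i + 1))) := by
  intro k
  induction k with
  | zero =>
    intro j c hjk hsh hvis
    have hj : j = a.length := by omega
    subst hj
    rw [List.range'_zero, List.map_nil, List.nil_append]
    have hvis' : pvCVis a.length (pvPf (i + 1) 0) c := by
      intro x y hx hy
      rw [hvis x y hx hy, pvPf, pvPf, decide_eq_decide]
      omega
    rw [Hrest c hsh hvis']
    constructor
    · intro h
      exact ⟨fun y hy hy' => absurd hy' (by omega), h⟩
    · intro h
      exact h.2
  | succ m ih =>
    intro j c hjk hsh hvis
    have hj : j < a.length := by omega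
    rw [List.range'_succ, List.map_cons, List.cons_append, List.foldl_cons]
    obtain ⟨hchar1, hchar2⟩ := pvCellStep_char a l r i j hpre hi hj c hsh hvis
    constructor
    · intro h
      -- the step's ok must be false, else the whole fold ends true
      have hstep : (pvCellStep (↑a.length) l r (a, c, false) (↑i, ↑j)).2.2 = false := by
        by_contra hne
        rw [pvCellFold_mono _ _ _ _ _ (by revert hne; cases (pvCellStep (↑a.length) l r (a, c, false) (↑i, ↑j)).2.2 <;> simp)] at h
        exact Bool.true_eq_false ▸ h
      have hgood := hchar2 hstep
      rw [hchar1 hgood] at h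
      have hih := (ih (j + 1) (pvSetB c ↑i ↑j) (by omega)
        (pvCShape_set hsh i j hi) ?vis).mp h
      case vis =>
        intro x y hx hy
        rw [pvGetB_setB hsh i j x y hi hj]
        split_ifs with hxy
        · rw [eq_comm, pvPf, decide_eq_true_eq]; omega
        · rw [hvis x y hx hy, pvPf, pvPf, decide_eq_decide]; omega
      refine ⟨?_, hih.2⟩
      intro y hy hy'
      rcases Nat.eq_or_lt_of_le hy with heq | hlt
      · rw [← heq]; exact hgood
      · exact hih.1 y hlt hy'
    · rintro ⟨hrow, htail⟩
      have hgood := hrow j le_rfl hj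
      rw [hchar1 hgood]
      refine (ih (j + 1) (pvSetB c ↑i ↑j) (by omega) (pvCShape_set hsh i j hi) ?_).mpr
        ⟨fun y hy hy' => hrow y (by omega) hy', htail⟩
      intro x y hx hy
      rw [pvGetB_setB hsh i j x y hi hj]
      split_ifs with hxy
      · rw [eq_comm, pvPf, decide_eq_true_eq]; omega
      · rw [hvis x y hx hy, pvPf, pvPf, decide_eq_decide]; omega

lemma pvOuter_main (a : List (List Int)) (l r : Int) (hpre : Pre_bfs a l r) :
    ∀ (m i : Nat) (c : List (List Bool)), i + m = a.length →
      pvCShape a.length c → pvCVis a.length (pvPf i 0) c →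
      ((((List.range' i m).flatMap (fun x : Nat => (List.range' 0 a.length).map
          (fun y : Nat => ((x : Int), (y : Int))))).foldl
          (pvCellStep (a.length : Int) l r) (a, c, false)).2.2 = false ↔
        pvTailGood a l r i) := by
  intro m
  induction m with
  | zero =>
    intro i c him hsh hvis
    have : i = a.length := by omega
    subst this
    rw [List.range'_zero, List.flatMap_nil, List.foldl_nil]
    simp only [true_iff]
    intro x y hx hy hax
    exact absurd hax (by omega)
  | succ m ih =>
    intro i c him hsh hvis
    have hi : i < a.length := by omega
    rw [List.range'_succ, List.flatMap_cons]
    have Hrest : ∀ c', pvCShape a.length c' → pvCVis a.length (pvPf (i + 1) 0) c' →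
        ((((List.range' (i + 1) m).flatMap (fun x : Nat => (List.range' 0 a.length).map
            (fun y : Nat => ((x : Int), (y : Int))))).foldl
            (pvCellStep (a.length : Int) l r) (a, c', false)).2.2 = false ↔
          pvTailGood a l r (i + 1)) := by
      intro c' hsh' hvis'
      exact ih (i + 1) c' (by omega) hsh' hvis'
    rw [pvRow_main a l r hpre i hi _ Hrest a.length 0 c (by omega) hsh hvis]
    constructor
    · rintro ⟨hrow, htail⟩
      intro x y hx hy hax
      rcases Nat.eq_or_lt_of_le hax with heq | hlt
      · rw [← heq]; exact hrow y (by omega) hy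
      · exact htail x y hx hy hlt
    · intro h
      exact ⟨fun y _ hy => h i y hi hy le_rfl, fun x y hx hy hax => h x y hx hy (by omega)⟩

lemma pvGetI_nat (a : List (List Int)) (x y : Nat) :
    pvGetI a ↑x ↑y = (a.getD x []).getD y 0 := by simp [pvGetI]

lemma pvBfs_false_iff (a : List (List Int)) (l r : Int) (hpre : Pre_bfs a l r) :
    (bfs a l r = false ↔ pvTailGood a l r 0) := by
  unfold bfs
  dsimp only
  rw [List.range_eq_range']
  have hsh0 : pvCShape a.length (List.replicate a.length (List.replicate a.length false)) := by
    refine ⟨List.length_replicate, ?_⟩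
    intro x hx
    rw [List.getD_eq_getElem?_getD, List.getElem?_replicate, if_pos hx]
    simp
  have hvis0 : pvCVis a.length (pvPf 0 0) (List.replicate a.length (List.replicate a.length false)) := by
    intro x y hx hy
    rw [pvGetB_nat]
    simp [List.getD_eq_getElem?_getD, hx, hy, pvPf]
  exact pvOuter_main a l r hpre a.length 0 _ (by omega) hsh0 hvis0

lemma pvAlt_false_iff (a : List (List Int)) (l r : Int) :
    (bfs_alt a l r = false ↔ pvTailGood a l r 0) := by
  unfold bfs_alt
  dsimp only
  rw [← Bool.not_eq_true]
  simp only [List.any_eq_true, List.mem_range, Bool.or_eq_true, Bool.and_eq_true,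
    decide_eq_true_eq]
  push Not
  constructor
  · intro h x y hx hy _
    obtain ⟨h1, h2⟩ := h x hx y hy
    refine ⟨fun hlt hQ => ?_, fun hlt hQ => ?_⟩
    · rw [pvQR, pvGetI_nat, pvGetI_nat, abs_sub_comm] at hQ
      exact absurd hQ.2 (not_le.mpr (h1 hlt hQ.1))
    · rw [pvQD, pvGetI_nat, pvGetI_nat, abs_sub_comm] at hQ
      exact absurd hQ.2 (not_le.mpr (h2 hlt hQ.1))
  · intro h x hx y hy
    refine ⟨fun hlt hle => ?_, fun hlt hle => ?_⟩
    · by_contra hcon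
      apply (h x y hx hy (by omega)).1 hlt
      rw [pvQR, pvGetI_nat, pvGetI_nat, abs_sub_comm]
      exact ⟨hle, le_of_not_gt hcon⟩
    · by_contra hcon
      apply (h x y hx hy (by omega)).2 hlt
      rw [pvQD, pvGetI_nat, pvGetI_nat, abs_sub_comm]
      exact ⟨hle, le_of_not_gt hcon⟩

-- ===== VERDICT (by name: the statement is the Claim_ definition above) =====
theorem bfs_spec : Claim_equal_bfs := by
  unfold Claim_equal_bfs
  intro a l r _ hpre
  unfold Spec_bfs
  have h1 := pvBfs_false_iff a l r hpre
  have h2 := pvAlt_false_iff a l r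
  cases hb : bfs a l r with
  | false => rw [eq_comm, h2, ← h1, hb]
  | true =>
    cases hb' : bfs_alt a l r with
    | true => rfl
    | false =>
      exfalso
      have ht : pvTailGood a l r 0 := h2.mp hb'
      have : bfs a l r = false := h1.mpr ht
      rw [hb] at this
      exact Bool.noConfusion this
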